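-- pv_equiv track=rewrite | github.com/LeducSama/intelligent-document-assistant | llm_rag_system.py | _extract_installation_info
-- ===== SOURCE A (Python) =====
-- def _extract_installation_info(content: str) -> str:
--     """Extract installation-specific information"""
--     lines = content.split('\n')
--     install_section = []
--     in_install_section = False
--
--     for line in lines:
--         if any(word in line.lower() for word in ['install', 'download', 'system requirements']):
--             in_install_section = True
--         elif line.strip() and line.startswith('#') and in_install_section:
--             if 'install' not in line.lower():
--                 break
--
--         if in_install_section:
--             install_section.append(line)
--
--     if install_section:
--         return "Here's how to install KeePass:\n\n" + '\n'.join(install_section[:20])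
--     else:
--         return "To install KeePass, you'll need to download it from the official website and follow the installation wizard."
-- ===== SOURCE B (Python) =====
-- _KEYWORDS = ('install', 'download', 'system requirements')
-- _DEFAULT = "To install KeePass, you'll need to download it from the official website and follow the installation wizard."
--
--
-- def _has_keyword(line):
--     low = line.lower()
--     return any(word in low for word in _KEYWORDS)
--
--
-- def _extract_installation_info(content: str) -> str:
--     """Extract installation-specific information (two-pass: find start, then collect)."""
--     lines = content.split('\n')
--     start = next((i for i, line in enumerate(lines) if _has_keyword(line)), None)
--     if start is None:
--         return _DEFAULT
--     section = []
--     for line in lines[start:]: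
--         if line.strip() and line.startswith('#') and not _has_keyword(line):
--             break
--         section.append(line)
--     return "Here's how to install KeePass:\n\n" + '\n'.join(section[:20])
-- ===== Notes on version B (the rewrite author's own statement) =====
-- stated objective: simpler
-- what changed: Replaces A's single flag-driven loop with two passes: find the first keyword line, then collect lines from there until a non-keyword heading; the flag state and the redundant inner keyword re-check disappear.
import Mathlib
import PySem

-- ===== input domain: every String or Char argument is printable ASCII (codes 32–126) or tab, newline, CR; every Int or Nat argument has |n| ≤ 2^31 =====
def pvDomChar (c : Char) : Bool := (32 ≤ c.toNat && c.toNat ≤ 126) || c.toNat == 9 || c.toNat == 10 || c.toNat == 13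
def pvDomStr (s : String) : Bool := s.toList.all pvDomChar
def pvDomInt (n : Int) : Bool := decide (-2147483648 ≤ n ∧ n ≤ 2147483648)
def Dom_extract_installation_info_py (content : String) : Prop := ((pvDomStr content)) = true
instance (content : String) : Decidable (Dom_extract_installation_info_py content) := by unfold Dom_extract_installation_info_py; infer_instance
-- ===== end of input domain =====

-- B is a simpler two-pass decomposition (find start, then collect until a non-keyword heading); return value proved equal to A's on all inputs.

-- ===== PORT A =====
-- any(word in line.lower() for word in ['install', 'download', 'system requirements'])
def pvHasKwA (line : String) : Bool :=
  PySem.Str.isIn "install" (PySem.Str.lower line) ||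
  PySem.Str.isIn "download" (PySem.Str.lower line) ||
  PySem.Str.isIn "system requirements" (PySem.Str.lower line)

-- A's for-loop with break: state = (accumulated install_section, in_install_section flag)
def pvALoop : List String → List String → Bool → List String
  | [], acc, _ => acc
  | line :: rest, acc, flag =>
    if pvHasKwA line then
      pvALoop rest (acc ++ [line]) true
    else if (PySem.Str.strip line != "") && PySem.Str.startswith line "#" && flag then
      if !(PySem.Str.isIn "install" (PySem.Str.lower line)) then acc  -- break
      else pvALoop rest (if flag then acc ++ [line] else acc) flag
    else
      pvALoop rest (if flag then acc ++ [line] else acc) flag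

def extract_installation_info_py (content : String) : String :=
  let lines := (PySem.Str.split? content "\n").getD []
  let install_section := pvALoop lines [] false
  if install_section != [] then
    "Here's how to install KeePass:\n\n" ++
      PySem.Str.join "\n" (PySem.List.slice install_section none (some 20))
  else
    "To install KeePass, you'll need to download it from the official website and follow the installation wizard."

-- ===== PORT B =====
def pvHasKwB (line : String) : Bool :=
  let low := PySem.Str.lower line
  PySem.Str.isIn "install" low || PySem.Str.isIn "download" low ||
    PySem.Str.isIn "system requirements" low

-- B's collect loop: append each line, break before a non-keyword heading
def pvBCollect : List String → List String → List String
  | [], acc => acc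
  | line :: rest, acc =>
    if (PySem.Str.strip line != "") && PySem.Str.startswith line "#" && !pvHasKwB line then
      acc  -- break
    else pvBCollect rest (acc ++ [line])

def extract_installation_info_py_alt (content : String) : String :=
  let lines := (PySem.Str.split? content "\n").getD []
  match List.findIdx? pvHasKwB lines with
  | none => "To install KeePass, you'll need to download it from the official website and follow the installation wizard."
  | some start =>
    let sect := pvBCollect (PySem.List.slice lines (some (start : Int)) none) []
    "Here's how to install KeePass:\n\n" ++
      PySem.Str.join "\n" (PySem.List.slice sect none (some 20))

-- ===== PRECONDITION & SPEC =====
def Spec_extract_installation_info_py (content : String) (out : String) : Prop := out = extract_installation_info_py_alt content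
instance (content : String) (out : String) : Decidable (Spec_extract_installation_info_py content out) := by unfold Spec_extract_installation_info_py; infer_instance

-- ===== CLAIM (what is proved, stated in full; the proofs are below) =====
def Claim_equal_extract_installation_info_py : Prop := ∀ (content : String), Dom_extract_installation_info_py content → Spec_extract_installation_info_py content (extract_installation_info_py content)

-- ===== LEMMAS AND PROOFS =====

theorem pvHasKw_eq (l : String) : pvHasKwA l = pvHasKwB l := rfl

theorem pvBCollect_ne_nil (ls acc : List String) (h : acc ≠ []) : pvBCollect ls acc ≠ [] := by
  induction ls generalizing acc with
  | nil => simpa [pvBCollect] using h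
  | cons l rest ih =>
    simp only [pvBCollect]
    split
    · exact h
    · exact ih _ (by simp)

theorem pvLoop_eq (ls acc : List String) : pvALoop ls acc true = pvBCollect ls acc := by
  induction ls generalizing acc with
  | nil => rfl
  | cons l rest ih =>
    by_cases hk : pvHasKwA l
    · have hkB : pvHasKwB l = true := (pvHasKw_eq l) ▸ hk
      simp only [pvALoop, pvBCollect, hk, hkB, if_true, Bool.not_true, Bool.and_false,
        Bool.false_eq_true, if_false]
      exact ih _
    · have hkB : pvHasKwB l = false := (pvHasKw_eq l) ▸ (Bool.not_eq_true _ ▸ hk)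
      have hinst : PySem.Str.isIn "install" (PySem.Str.lower l) = false := by
        have : pvHasKwA l = false := by simpa using hk
        unfold pvHasKwA at this
        simp only [Bool.or_eq_false_iff] at this
        exact this.1.1
      simp only [pvALoop, pvBCollect, hk, hkB, hinst, if_false, Bool.not_false, Bool.and_true,
        Bool.false_eq_true]
      split
      · simp
      · exact ih _

theorem pvALoop_skip (l : String) (rest acc : List String) (h : pvHasKwA l = false) :
    pvALoop (l :: rest) acc false = pvALoop rest acc false := by
  simp [pvALoop, h]

theorem pvBody_eq (ls : List String) :
    (if pvALoop ls [] false != [] then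
      "Here's how to install KeePass:\n\n" ++
        PySem.Str.join "\n" (PySem.List.slice (pvALoop ls [] false) none (some 20))
    else
      "To install KeePass, you'll need to download it from the official website and follow the installation wizard.")
    =
    (match List.findIdx? pvHasKwB ls with
    | none => "To install KeePass, you'll need to download it from the official website and follow the installation wizard."
    | some start =>
      "Here's how to install KeePass:\n\n" ++
        PySem.Str.join "\n"
          (PySem.List.slice (pvBCollect (PySem.List.slice ls (some (start : Int)) none) []) none
            (some 20))) := by
  induction ls with
  | nil => rfl
  | cons l rest ih =>
    by_cases hk : pvHasKwA l
    · have hkB : pvHasKwB l = true := (pvHasKw_eq l) ▸ hk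
      have hA : pvALoop (l :: rest) [] false = pvBCollect rest [l] := by
        simp only [pvALoop, hk, if_true, List.nil_append]
        exact pvLoop_eq rest [l]
      have hBne : pvBCollect rest [l] ≠ [] := pvBCollect_ne_nil rest [l] (by simp)
      have hfind : List.findIdx? pvHasKwB (l :: rest) = some 0 := by
        simp [List.findIdx?_cons, hkB]
      rw [hfind, hA]
      have hslice : PySem.List.slice (l :: rest) (some ((0 : Nat) : Int)) none = l :: rest := by
        rw [PySem.List.slice_from_natCast]; rfl
      simp only [hslice]
      have hB : pvBCollect (l :: rest) [] = pvBCollect rest [l] := by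
        simp [pvBCollect, hkB]
      rw [hB]
      simp [hBne]
    · have hkA : pvHasKwA l = false := by simpa using hk
      have hkB : pvHasKwB l = false := (pvHasKw_eq l) ▸ hkA
      rw [pvALoop_skip l rest [] hkA]
      rw [ih]
      have hfind : List.findIdx? pvHasKwB (l :: rest) =
          (List.findIdx? pvHasKwB rest).map (· + 1) := by
        simp [List.findIdx?_cons, hkB]
      rw [hfind]
      cases hfr : List.findIdx? pvHasKwB rest with
      | none => simp
      | some i =>
        simp only [Option.map_some]
        have h1 : PySem.List.slice (l :: rest) (some ((i + 1 : Nat) : Int)) none =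
            (l :: rest).drop (i + 1) := PySem.List.slice_from_natCast _ _
        have h2 : PySem.List.slice rest (some ((i : Nat) : Int)) none = rest.drop i :=
          PySem.List.slice_from_natCast _ _
        simp only [h1, h2, List.drop_succ_cons]

-- ===== VERDICT (by name: the statement is the Claim_ definition above) =====
theorem extract_installation_info_py_spec : Claim_equal_extract_installation_info_py := by
  intro content _
  unfold Spec_extract_installation_info_py extract_installation_info_py extract_installation_info_py_alt
  exact pvBody_eq ((PySem.Str.split? content "\n").getD [])
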